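-- pv_equiv track=rewrite | github.com/tito-kimbo/Algebra-Computacional | python_alcp/utils.py | print_superscript
-- ===== SOURCE A (Python) =====
-- def print_superscript(n: int):
--     uni = [
--         "\U00002070",
--         "\U000000B9",
--         "\U000000B2",
--         "\U000000B3",
--         "\U00002074",
--         "\U00002075",
--         "\U00002076",
--         "\U00002077",
--         "\U00002078",
--         "\U00002079"
--     ]
--     digits = []
--     while n > 0:
--         digits.append(uni[n % 10])
--         n //= 10
--
--     return ''.join(digits[::-1])
-- ===== SOURCE B (Python) =====
-- _SUP = str.maketrans("0123456789", "\u2070\u00b9\u00b2\u00b3\u2074\u2075\u2076\u2077\u2078\u2079")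
--
--
-- def print_superscript(n: int):
--     if n <= 0:
--         return ''
--     return str(n).translate(_SUP)
-- ===== Notes on version B (the rewrite author's own statement) =====
-- stated objective: idiomatic
-- what changed: replaces the modulo/floor-division digit-extraction loop with list reversal by a translation table (str.maketrans/translate) applied to str(n), guarding nonpositive n to return the empty string as A does
import Mathlib
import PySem

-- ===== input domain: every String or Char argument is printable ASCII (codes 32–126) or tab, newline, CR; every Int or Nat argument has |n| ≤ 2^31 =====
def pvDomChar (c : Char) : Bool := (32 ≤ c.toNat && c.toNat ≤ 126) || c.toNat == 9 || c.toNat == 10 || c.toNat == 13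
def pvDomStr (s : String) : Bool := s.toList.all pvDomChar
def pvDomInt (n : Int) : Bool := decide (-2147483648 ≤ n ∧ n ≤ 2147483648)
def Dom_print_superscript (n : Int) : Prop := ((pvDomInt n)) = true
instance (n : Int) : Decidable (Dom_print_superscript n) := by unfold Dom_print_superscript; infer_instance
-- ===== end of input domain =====

-- B renders n via a digit→superscript translation table applied to str(n) (guarding n ≤ 0 to '')
-- instead of A's %10 // 10 extraction loop with a final reversal; objective: idiomatic, same cost.

-- ===== PORT A =====
-- the 'uni' list of A, verbatim
def psUni : List String := ["⁰", "¹", "²", "³", "⁴", "⁵", "⁶", "⁷", "⁸", "⁹"]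

-- cited by psLoop's decreasing_by (termination only)
theorem psFdiv (n : Int) : Int.fdiv n 10 = n / 10 := by
  rw [Int.fdiv_eq_ediv, if_pos (Or.inl (by norm_num))]; ring

-- the 'while n > 0' loop of A; uni[n % 10] ported with pyGet? (the index is always 0..9, so getD never fires)
def psLoop (n : Int) (digits : List String) : List String :=
  if 0 < n then
    psLoop (PySem.Int.floordiv n 10)
      (digits ++ [(PySem.List.pyGet? psUni (PySem.Int.mod n 10)).getD ""])
  else digits
termination_by n.toNat
decreasing_by
  rename_i h
  simp only [PySem.Int.floordiv, psFdiv]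
  omega

-- ''.join(digits[::-1])
def print_superscript (n : Int) : String :=
  String.join ((PySem.List.slice? (psLoop n []) none none (-1)).getD [])

-- ===== PORT B =====
-- the str.maketrans table of Source B
def psTable : PySem.Dict Char Char :=
  PySem.Dict.ofList [('0','⁰'),('1','¹'),('2','²'),('3','³'),('4','⁴'),
                     ('5','⁵'),('6','⁶'),('7','⁷'),('8','⁸'),('9','⁹')]

-- str(n).translate(_SUP): map each character, unmapped characters pass through (never happens here)
def print_superscript_alt (n : Int) : String :=
  if n ≤ 0 then ""
  else String.ofList ((PySem.Int.toChars n).map (fun c => PySem.Dict.getD psTable c c))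

-- ===== PRECONDITION & SPEC =====
def Spec_print_superscript (n : Int) (out : String) : Prop := out = print_superscript_alt n
instance (n : Int) (out : String) : Decidable (Spec_print_superscript n out) := by unfold Spec_print_superscript; infer_instance

-- ===== CLAIM (what is proved, stated in full; the proofs are below) =====
def Claim_equal_print_superscript : Prop := ∀ (n : Int), Dom_print_superscript n → Spec_print_superscript n (print_superscript n)

-- ===== LEMMAS AND PROOFS =====

-- one superscript character (of B's table) as the single-character string A's uni list holds
def psSup (c : Char) : String := String.ofList [PySem.Dict.getD psTable c c]

theorem psFmod (n : Int) : Int.fmod n 10 = n % 10 := by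
  rw [Int.fmod_eq_emod, if_pos (Or.inl (by norm_num))]; ring

theorem psLoop_nonpos (n : Int) (h : ¬ 0 < n) (acc : List String) : psLoop n acc = acc := by
  rw [psLoop]; simp [h]

theorem psLoop_pos_eq (n : Int) (acc : List String) (h : 0 < n) :
    psLoop n acc =
      psLoop (PySem.Int.floordiv n 10)
        (acc ++ [(PySem.List.pyGet? psUni (PySem.Int.mod n 10)).getD ""]) := by
  conv_lhs => rw [psLoop]
  simp [h]

theorem psLoop_acc (n : Int) (acc : List String) : psLoop n acc = acc ++ psLoop n [] := by
  by_cases h : 0 < n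
  · rw [psLoop_pos_eq n acc h, psLoop_pos_eq n [] h]
    rw [psLoop_acc (PySem.Int.floordiv n 10)
          (acc ++ [(PySem.List.pyGet? psUni (PySem.Int.mod n 10)).getD ""]),
        psLoop_acc (PySem.Int.floordiv n 10)
          ([] ++ [(PySem.List.pyGet? psUni (PySem.Int.mod n 10)).getD ""])]
    simp
  · rw [psLoop_nonpos n h, psLoop_nonpos n h]; simp
termination_by n.toNat
decreasing_by
  all_goals simp only [PySem.Int.floordiv, psFdiv]; omega

theorem psLoop_cast_step (m : Nat) (h : 0 < m) :
    psLoop (m : Int) [] =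
      (PySem.List.pyGet? psUni ((m % 10 : Nat) : Int)).getD "" :: psLoop ((m / 10 : Nat) : Int) [] := by
  rw [psLoop_pos_eq (m : Int) [] (by exact_mod_cast h)]
  rw [psLoop_acc]
  have h1 : PySem.Int.floordiv (m : Int) 10 = ((m / 10 : Nat) : Int) := by
    simp only [PySem.Int.floordiv, psFdiv]
    push_cast
    rfl
  have h2 : PySem.Int.mod (m : Int) 10 = ((m % 10 : Nat) : Int) := by
    simp only [PySem.Int.mod, psFmod]
    push_cast
    rfl
  rw [h1, h2]
  simp

theorem psDigit (d : Nat) (hd : d < 10) :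
    (PySem.List.pyGet? psUni ((d : Nat) : Int)).getD "" = psSup (Nat.digitChar d) := by
  interval_cases d <;> decide

theorem flatten_singleton_map (l : List Char) (f : Char → Char) :
    (l.map (fun c => [f c])).flatten = l.map f := by
  induction l <;> simp_all

theorem join_map_singleton (l : List Char) (f : Char → Char) :
    String.join (l.map (fun c => String.ofList [f c])) = String.ofList (l.map f) := by
  rw [String.join_eq]
  congr 1
  rw [List.map_map]
  have : (String.toList ∘ fun c => String.ofList [f c]) = fun c => [f c] := by
    funext c; simp
  rw [this, flatten_singleton_map]

theorem psLoop_reverse (m : Nat) (h : 0 < m) :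
    (psLoop (m : Int) []).reverse = (Nat.toDigits 10 m).map psSup := by
  induction m using Nat.strong_induction_on with
  | _ m ih =>
    rw [psLoop_cast_step m h]
    by_cases h10 : m < 10
    · rw [Nat.toDigits_of_lt_base h10]
      have hz : m / 10 = 0 := Nat.div_eq_of_lt h10
      rw [hz, psLoop_nonpos _ (by omega)]
      rw [psDigit (m % 10) (by omega)]
      rw [Nat.mod_eq_of_lt h10]
      rfl
    · have hq : 0 < m / 10 := Nat.div_pos (by omega) (by omega)
      have hlt : m / 10 < m := Nat.div_lt_self h (by omega)
      rw [Nat.toDigits_of_base_le (by omega : (1:Nat) < 10) (by omega : (10:Nat) ≤ m)]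
      rw [List.map_append, List.reverse_cons, ih (m / 10) hlt hq]
      rw [psDigit (m % 10) (by omega)]
      rfl

-- ===== VERDICT (by name: the statement is the Claim_ definition above) =====
theorem print_superscript_spec : Claim_equal_print_superscript := by
  intro n _
  unfold Spec_print_superscript print_superscript print_superscript_alt
  rw [PySem.List.slice?_none_none_neg_one]
  by_cases h : 0 < n
  · rw [if_neg (by omega)]
    have hn : n = ((n.toNat : Nat) : Int) := by omega
    simp only [Option.getD_some]
    rw [hn, psLoop_reverse n.toNat (by omega)]
    have htc : PySem.Int.toChars ((n.toNat : Nat) : Int) = Nat.toDigits 10 n.toNat := by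
      simp only [PySem.Int.toChars, Int.toNat_natCast]
      rw [if_neg (by omega)]
    rw [htc]
    rw [show psSup = fun c => String.ofList [PySem.Dict.getD psTable c c] from rfl]
    rw [join_map_singleton]
  · rw [if_pos (by omega), psLoop_nonpos n h]
    rfl
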